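-- pv_equiv track=rewrite | github.com/rafaelcgama/interviews | interview_questions/cash_app.py | championship1
-- ===== SOURCE A (Python) =====
-- from collections import Counter, defaultdict
--
-- def championship1(races, points):
--     racer_points = defaultdict(int)
--     for race in races:
--         for i, racer in enumerate(race):
--             if i == 0:
--                 racer_points[racer] += points[i]
--             elif i == 1:
--                 racer_points[racer] += points[i]
--
--             elif i == 2:
--                 racer_points[racer] += points[i]
--
--             else:
--                 racer_points[racer] += 0
--     return dict(sorted(racer_points.items(), key=lambda x: x[1], reverse=True))
-- ===== SOURCE B (Python) =====
-- def championship1(races, points):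
--     # distinct racers in first-appearance order
--     seen = set()
--     racers = []
--     for race in races:
--         for r in race:
--             if r not in seen:
--                 seen.add(r)
--                 racers.append(r)
--
--     def total(r):
--         t = 0
--         for race in races:
--             for i in range(min(3, len(race))):
--                 if race[i] == r:
--                     t += points[i]
--         return t
--
--     return dict(sorted(((r, total(r)) for r in racers), key=lambda x: x[1], reverse=True))
-- ===== Notes on version B (the rewrite author's own statement) =====
-- stated objective: alternative
-- what changed: Replaces A's single-pass dict accumulation (defaultdict updated per position while iterating) by per-racer aggregation: first collect the distinct racers in first-appearance order, then compute each racer's total with an independent scan over the top-3 positions of every race, then sort the (racer, total) pairs by value descending.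
import Mathlib
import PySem

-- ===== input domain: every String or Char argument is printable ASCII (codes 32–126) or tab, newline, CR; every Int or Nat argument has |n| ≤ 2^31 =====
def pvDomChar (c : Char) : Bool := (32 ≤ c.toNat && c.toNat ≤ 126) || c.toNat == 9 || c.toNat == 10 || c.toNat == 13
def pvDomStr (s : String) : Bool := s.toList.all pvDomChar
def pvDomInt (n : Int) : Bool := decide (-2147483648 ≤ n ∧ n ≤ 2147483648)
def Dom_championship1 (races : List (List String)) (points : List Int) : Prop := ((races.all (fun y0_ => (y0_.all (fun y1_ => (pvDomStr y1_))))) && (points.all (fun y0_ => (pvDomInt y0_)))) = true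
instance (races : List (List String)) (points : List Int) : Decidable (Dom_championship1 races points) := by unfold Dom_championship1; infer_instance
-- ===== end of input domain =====

-- B replaces A's single-pass dict accumulation by per-racer aggregation: collect the distinct
-- racers in first-appearance order, compute each one's total by an independent scan over the
-- top-3 positions of every race, then sort by value descending (alternative decomposition).


-- ===== PORT A =====
def championship1 (races : List (List String)) (points : List Int) : List (String × Int) :=
  let racerPoints : PySem.Dict String Int :=
    races.foldl (fun d race =>
      (PySem.List.enumerate race 0).foldl (fun d p =>
        if p.1 = 0 then d.modify p.2 0 (· + PySem.List.pyGetD points p.1 0)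
        else if p.1 = 1 then d.modify p.2 0 (· + PySem.List.pyGetD points p.1 0)
        else if p.1 = 2 then d.modify p.2 0 (· + PySem.List.pyGetD points p.1 0)
        else d.modify p.2 0 (· + 0)) d)
      PySem.Dict.empty
  PySem.List.sorted racerPoints.items (fun x => x.2) true

-- ===== PORT B =====
-- helper: B's 'total(r)' — scan every race's top-3 positions, adding points[i] when race[i] == r
def pvTotalB (races : List (List String)) (points : List Int) (r : String) : Int :=
  races.foldl (fun t race =>
    (PySem.List.pyRange 0 (min 3 (race.length : Int)) 1).foldl (fun t i =>
      if PySem.List.pyGetD race i "" = r then t + PySem.List.pyGetD points i 0 else t) t) 0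

def championship1_alt (races : List (List String)) (points : List Int) : List (String × Int) :=
  -- pass 1: distinct racers in first-appearance order (seen set + racers list)
  let racers : PySem.Set String × List String :=
    races.foldl (fun st race =>
      race.foldl (fun (st : PySem.Set String × List String) r =>
        if PySem.Set.contains st.1 r then st else (PySem.Set.add st.1 r, st.2 ++ [r])) st)
      (PySem.Set.empty, [])
  -- pass 2: per-racer totals, then sort by value descending
  PySem.List.sorted (racers.2.map (fun r => (r, pvTotalB races points r))) (fun x => x.2) true

-- ===== PRECONDITION & SPEC =====
-- Pre_ excludes exactly the inputs where the Python A raises IndexError: some race fills a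
-- top-3 position i with i ≥ len(points) (there 'points[i]' raises; B raises identically).
def Pre_championship1 (races : List (List String)) (points : List Int) : Prop :=
  ∀ race ∈ races, min 3 race.length ≤ points.length
instance (races : List (List String)) (points : List Int) : Decidable (Pre_championship1 races points) := by unfold Pre_championship1; infer_instance
def pvWitness_championship1 : List (List String) × List Int := ([["a", "b"], ["b"]], [10, 5, 2])
def Spec_championship1 (races : List (List String)) (points : List Int) (out : List (String × Int)) : Prop := out = championship1_alt races points
instance (races : List (List String)) (points : List Int) (out : List (String × Int)) : Decidable (Spec_championship1 races points out) := by unfold Spec_championship1; infer_instance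

-- ===== CLAIM (what is proved, stated in full; the proofs are below) =====
def Claim_equal_championship1 : Prop := ∀ (races : List (List String)) (points : List Int), Dom_championship1 races points → Pre_championship1 races points → Spec_championship1 races points (championship1 races points)

-- ===== LEMMAS AND PROOFS =====

-- abbreviations used only by the proofs
def pvDelta (points : List Int) (i : Int) : Int := if i < 3 then PySem.List.pyGetD points i 0 else 0
def pvStepA (points : List Int) (d : PySem.Dict String Int) (p : Int × String) : PySem.Dict String Int :=
  d.modify p.2 0 (· + pvDelta points p.1)
def pvTok (races : List (List String)) : List String := races.flatMap (fun r => r)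
def pvS (races : List (List String)) : List (Int × String) :=
  races.flatMap (fun race => PySem.List.enumerate race 0)
def pvPairs (points : List Int) (race : List String) : List (String × Int) :=
  (PySem.List.pyRange 0 (min 3 (race.length : Int)) 1).map
    (fun i => (PySem.List.pyGetD race i "", PySem.List.pyGetD points i 0))
def pvP (races : List (List String)) (points : List Int) : List (String × Int) :=
  races.flatMap (pvPairs points)

-- nested foldl flattens to a foldl over the flatMap
theorem pv_foldl_nested {γ β δ : Type} (l : List γ) (h : γ → List β) (f : δ → β → δ) (d : δ) :
    l.foldl (fun d c => (h c).foldl f d) d = (l.flatMap h).foldl f d := by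
  induction l generalizing d with
  | nil => rfl
  | cons c l ih => simp [List.flatMap_cons, List.foldl_append, ih]

-- value of a modify-accumulate loop
theorem pv_getD_foldl_modify {β : Type} (l : List β) (key : β → String) (g : β → Int)
    (d : PySem.Dict String Int) (k : String) :
    (l.foldl (fun d x => d.modify (key x) 0 (· + g x)) d).getD k 0
      = d.getD k 0 + (l.map (fun x => if key x = k then g x else 0)).sum := by
  induction l generalizing d with
  | nil => simp
  | cons x l ih =>
    simp only [List.foldl_cons, ih, List.map_cons, List.sum_cons, PySem.Dict.getD_modify]
    by_cases hk : k = key x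
    · subst hk; simp; ring
    · rw [if_neg hk, if_neg (fun h => hk h.symm)]; ring

-- truncating a sum whose terms vanish from index 3 on
theorem pv_sum_range_min (n : Nat) (G : Nat → Int) :
    ((List.range n).map (fun j => if j < 3 then G j else 0)).sum
      = ((List.range (min 3 n)).map G).sum := by
  induction n with
  | zero => rfl
  | succ n ih =>
    rw [List.range_succ, List.map_append, List.sum_append]
    by_cases h3 : n < 3
    · have e1 : min 3 (n + 1) = n + 1 := by omega
      have e2 : min 3 n = n := by omega
      rw [ih, e2, e1, List.range_succ, List.map_append, List.sum_append]
      simp [h3]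
    · have e1 : min 3 (n + 1) = min 3 n := by omega
      rw [ih, e1]
      simp [h3]

-- sum of a map over a flatMap is the sum of the per-chunk sums
theorem pv_sum_flatMap {γ β : Type} (l : List γ) (h : γ → List β) (f : β → Int) :
    ((l.flatMap h).map f).sum = (l.map (fun c => ((h c).map f).sum)).sum := by
  induction l with
  | nil => rfl
  | cons c l ih => simp [List.flatMap_cons, ih]

-- A's loop body, on any index produced by enumerate, is the uniform pvStepA
theorem pv_dictA_flat (races : List (List String)) (points : List Int) :
    races.foldl (fun d race =>
      (PySem.List.enumerate race 0).foldl (fun d p =>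
        if p.1 = 0 then d.modify p.2 0 (· + PySem.List.pyGetD points p.1 0)
        else if p.1 = 1 then d.modify p.2 0 (· + PySem.List.pyGetD points p.1 0)
        else if p.1 = 2 then d.modify p.2 0 (· + PySem.List.pyGetD points p.1 0)
        else d.modify p.2 0 (· + 0)) d) (PySem.Dict.empty : PySem.Dict String Int)
    = (pvS races).foldl (pvStepA points) PySem.Dict.empty := by
  rw [pv_foldl_nested]
  refine PySem.List.foldl_congr_mem' _ _ _ _ (fun p hp d => ?_)
  have hpos : 0 ≤ p.1 := by
    rw [List.mem_flatMap] at hp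
    obtain ⟨race, _, hpr⟩ := hp
    rw [PySem.List.mem_enumerate_iff] at hpr
    obtain ⟨k, hk, rfl⟩ := hpr
    simp
  by_cases h0 : p.1 = 0
  · simp [pvStepA, pvDelta, h0]
  · by_cases h1 : p.1 = 1
    · simp [pvStepA, pvDelta, h1]
    · by_cases h2 : p.1 = 2
      · simp [pvStepA, pvDelta, h2]
      · have h3 : ¬ p.1 < 3 := by omega
        simp [pvStepA, pvDelta, h0, h1, h2, h3]

-- value of A's dict
theorem pv_valA (races : List (List String)) (points : List Int) (k : String) :
    ((pvS races).foldl (pvStepA points) (PySem.Dict.empty : PySem.Dict String Int)).getD k 0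
      = ((pvS races).map (fun p => if p.2 = k then pvDelta points p.1 else 0)).sum := by
  have := pv_getD_foldl_modify (pvS races) (fun p => p.2) (fun p => pvDelta points p.1)
    PySem.Dict.empty k
  simpa [pvStepA] using this

-- keys of A's dict
theorem pv_keysA (races : List (List String)) (points : List Int) :
    ((pvS races).foldl (pvStepA points) (PySem.Dict.empty : PySem.Dict String Int)).keys
      = PySem.Set.ofList (pvTok races) := by
  have hstep : pvStepA points = fun (d : PySem.Dict String Int) (x : Int × String) =>
      d.modify x.2 0 (· + pvDelta points x.1) := rfl
  rw [hstep, PySem.Dict.keys_foldl_modify_key (pvS races) (fun p => p.2) 0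
    (fun _ p => (· + pvDelta points p.1)) PySem.Dict.empty,
    PySem.Dict.keys_empty, PySem.Set.update_nil_left]
  congr 1
  simp only [pvS, pvTok, List.map_flatMap]
  exact List.flatMap_congr (fun race _ => PySem.List.map_snd_enumerate race 0)

-- B's pass 1, on a pair whose components agree, keeps them equal to a Set.add fold
theorem pv_seen_fold (l : List String) (s : PySem.Set String) :
    l.foldl (fun (st : PySem.Set String × List String) r =>
        if PySem.Set.contains st.1 r then st else (PySem.Set.add st.1 r, st.2 ++ [r])) (s, s)
      = (PySem.Set.update s l, PySem.Set.update s l) := by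
  induction l generalizing s with
  | nil => simp [PySem.Set.update]
  | cons x l ih =>
    rw [List.foldl_cons, PySem.Set.update_cons]
    by_cases hx : x ∈ s
    · rw [if_pos (by simpa [PySem.Set.contains_iff] using hx),
        PySem.Set.add_of_mem hx]
      exact ih s
    · rw [if_neg (by simpa [PySem.Set.contains_iff] using hx)]
      have : PySem.Set.add s x = s ++ [x] := by
        simp [PySem.Set.add, hx]
      rw [this]
      exact ih (s ++ [x])

-- B's racer list is the distinct tokens in first-appearance order
theorem pv_racersB (races : List (List String)) :
    (races.foldl (fun st race =>
      race.foldl (fun (st : PySem.Set String × List String) r =>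
        if PySem.Set.contains st.1 r then st else (PySem.Set.add st.1 r, st.2 ++ [r])) st)
      ((PySem.Set.empty : PySem.Set String), ([] : List String))).2
    = PySem.Set.ofList (pvTok races) := by
  rw [pv_foldl_nested]
  have : ((PySem.Set.empty : PySem.Set String), ([] : List String))
      = (((PySem.Set.empty : PySem.Set String)), (PySem.Set.empty : PySem.Set String)) := rfl
  rw [this, pv_seen_fold]
  simp only [pvTok, List.flatMap_id']
  exact PySem.Set.update_nil_left _

-- B's total, flattened: the same sum over the per-race (racer, points) pairs
theorem pv_totalB_sum (races : List (List String)) (points : List Int) (r : String) :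
    pvTotalB races points r
      = ((pvP races points).map (fun p => if p.1 = r then p.2 else 0)).sum := by
  unfold pvTotalB
  have hbody : (fun (t : Int) (race : List String) =>
      (PySem.List.pyRange 0 (min 3 (race.length : Int)) 1).foldl (fun t i =>
        if PySem.List.pyGetD race i "" = r then t + PySem.List.pyGetD points i 0 else t) t)
      = (fun (t : Int) (race : List String) =>
          (pvPairs points race).foldl (fun t p =>
            if p.1 = r then t + p.2 else t) t) := by
    funext t race
    rw [pvPairs, List.foldl_map]
  rw [hbody, pv_foldl_nested]
  show ((pvP races points).foldl (fun t p => if p.1 = r then t + p.2 else t) 0) = _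
  induction pvP races points using List.reverseRecOn with
  | nil => simp
  | append_singleton l p ih =>
    rw [List.foldl_append, List.map_append, List.sum_append, List.foldl_cons, List.foldl_nil, ih]
    by_cases hp : p.1 = r <;> simp [hp]

-- per-race value equality between A's enumerate formulation and the pvPairs formulation
theorem pv_race_sum (points : List Int) (race : List String) (k : String) :
    ((PySem.List.enumerate race 0).map (fun p => if p.2 = k then pvDelta points p.1 else 0)).sum
      = ((pvPairs points race).map (fun p => if p.1 = k then p.2 else 0)).sum := by
  rw [PySem.List.enumerate_eq_map_pyRange race ""]
  simp only [pvPairs, List.map_map, Function.comp_def]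
  rw [show PySem.List.len race = ((race.length : Nat) : Int) from by simp [PySem.List.len],
     show (min 3 ((race.length : Nat) : Int)) = ((min 3 race.length : Nat) : Int) from by
        push_cast; omega,
     PySem.List.pyRange_zero_nat, PySem.List.pyRange_zero_nat]
  simp only [List.map_map, Function.comp_def]
  rw [List.map_congr_left (l := List.range race.length)
      (g := fun j : Nat => if j < 3 then
        (if PySem.List.pyGetD race (j : Int) "" = k then PySem.List.pyGetD points (j : Int) 0 else 0)
        else 0)
      (fun j _ => by
        simp only [pvDelta]
        by_cases h3 : j < 3
        · have hc : ((j : Int) < 3) := by omega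
          by_cases hk : PySem.List.pyGetD race (j : Int) "" = k <;> simp [h3, hk, hc]
        · have hc : ¬ ((j : Int) < 3) := by omega
          by_cases hk : PySem.List.pyGetD race (j : Int) "" = k <;> simp [h3, hk, hc]),
    pv_sum_range_min]

-- the pre-sort lists of the two ports are equal
theorem pv_presort_eq (races : List (List String)) (points : List Int) :
    (races.foldl (fun d race =>
      (PySem.List.enumerate race 0).foldl (fun d p =>
        if p.1 = 0 then d.modify p.2 0 (· + PySem.List.pyGetD points p.1 0)
        else if p.1 = 1 then d.modify p.2 0 (· + PySem.List.pyGetD points p.1 0)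
        else if p.1 = 2 then d.modify p.2 0 (· + PySem.List.pyGetD points p.1 0)
        else d.modify p.2 0 (· + 0)) d) (PySem.Dict.empty : PySem.Dict String Int)).items
    = (races.foldl (fun st race =>
        race.foldl (fun (st : PySem.Set String × List String) r =>
          if PySem.Set.contains st.1 r then st else (PySem.Set.add st.1 r, st.2 ++ [r])) st)
        ((PySem.Set.empty : PySem.Set String), ([] : List String))).2.map
        (fun r => (r, pvTotalB races points r)) := by
  rw [pv_dictA_flat, pv_racersB]
  set dA := (pvS races).foldl (pvStepA points) (PySem.Dict.empty : PySem.Dict String Int) with hdA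
  rw [PySem.Dict.items_eq_map_keys dA (by rw [hdA, pv_keysA]; exact PySem.Set.nodup_ofList _) 0,
      hdA, pv_keysA, ← hdA]
  refine List.map_congr_left (fun k _ => ?_)
  rw [hdA, pv_valA, pv_totalB_sum]
  simp only [pvS, pvP]
  rw [pv_sum_flatMap, pv_sum_flatMap]
  exact congrArg (fun l => Prod.mk k (List.sum l))
    (List.map_congr_left (fun race _ => pv_race_sum points race k))

-- ===== VERDICT (by name: the statement is the Claim_ definition above) =====
theorem championship1_spec : Claim_equal_championship1 := by
  intro races points _ _
  show championship1 races points = championship1_alt races points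
  simp only [championship1, championship1_alt]
  rw [pv_presort_eq]
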